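-- pv_equiv track=rewrite | github.com/Jwbeiisk/daily-coding-problem | feb-2021/Feb23.py | de_bruijn_sequence
-- ===== SOURCE A (Python) =====
-- def de_bruijn_sequence(C, k, substrings, seqs, seq=""):
--     if not substrings:
--         return set([seq])
--
--     for char in C:
--         # Choose last k - 1 characters and join with an element in C
--         new_substring =seq[1 - k:] + str(char)
--         # If this new combination exists in substrings, append to final sequence
--         if new_substring in substrings:
--             # Find the rest of the sequence through recursion in the same way
--             seqs |= de_bruijn_sequence(C, k, substrings - set([new_substring]), seqs, seq + str(char))
--
--     return seqs
-- ===== SOURCE B (Python) =====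
-- def de_bruijn_sequence(C, k, substrings, seqs, seq=""):
--     if not substrings:
--         return set([seq])
--     stack = [(substrings, seq)]
--     while stack:
--         rem, s = stack.pop()
--         if not rem:
--             seqs.add(s)
--         else:
--             children = []
--             for char in C:
--                 new_substring = s[1 - k:] + str(char)
--                 if new_substring in rem:
--                     children.append((rem - set([new_substring]), s + str(char)))
--             stack.extend(reversed(children))
--     return seqs
-- ===== Notes on version B (the rewrite author's own statement) =====
-- stated objective: alternative
-- what changed: Replaced A's recursive backtracking (which threads the accumulated set through aliased recursive calls and unions each recursive result back in) with an explicit stack-based iterative DFS that pops (remaining-substrings, sequence) states and adds completed sequences directly to the result set.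
import Mathlib
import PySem

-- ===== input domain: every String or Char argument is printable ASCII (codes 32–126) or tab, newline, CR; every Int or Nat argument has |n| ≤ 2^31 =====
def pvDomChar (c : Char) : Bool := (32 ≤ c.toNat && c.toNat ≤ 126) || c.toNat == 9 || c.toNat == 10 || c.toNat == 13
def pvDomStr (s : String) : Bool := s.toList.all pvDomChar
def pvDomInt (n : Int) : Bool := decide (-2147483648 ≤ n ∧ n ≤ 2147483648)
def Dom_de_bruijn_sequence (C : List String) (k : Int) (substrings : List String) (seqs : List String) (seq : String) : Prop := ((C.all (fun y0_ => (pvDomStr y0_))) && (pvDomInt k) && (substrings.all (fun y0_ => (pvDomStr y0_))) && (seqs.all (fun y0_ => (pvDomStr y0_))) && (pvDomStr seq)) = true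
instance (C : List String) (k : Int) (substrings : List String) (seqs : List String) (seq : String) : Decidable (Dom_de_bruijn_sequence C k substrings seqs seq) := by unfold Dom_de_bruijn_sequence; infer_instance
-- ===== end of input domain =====

-- B replaces A's recursive backtracking (which threads the accumulator set through
-- the recursion and relies on aliasing) by an explicit stack-based DFS loop; same
-- return value (Python A and B both also mutate the caller's `seqs` in place except
-- in the empty-`substrings` case).

-- shared helper: the Python expression `seq[1 - k:] + str(char)` (identical line in A and B)
def pvNewSub (k : Int) (s : String) (ch : String) : String :=
  PySem.Str.slice s (some (1 - k)) none ++ ch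

-- termination helper for port A: `substrings - set([ns])` is strictly smaller when ns ∈ substrings
theorem pvDiff_length_lt {rem : List String} {ns : String} (h : ns ∈ rem) :
    (PySem.Set.diff rem [ns]).length < rem.length := by
  unfold PySem.Set.diff
  apply List.length_filter_lt_length_iff_exists.mpr
  exact ⟨ns, h, by simp⟩

-- ===== PORT A =====
-- A's for-loop is the structural recursion dbForA over the remaining chars;
-- `seqs |= rec(...)` becomes Set.union (the recursive call receives the current seqs,
-- matching Python's aliasing of the mutated set).
mutual
def de_bruijn_sequence (C : List String) (k : Int) (substrings : List String) (seqs : List String) (seq : String) : List String :=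
  if substrings = [] then PySem.Set.ofList [seq]
  else dbForA C k substrings seqs seq C
  termination_by (substrings.length, 1, 1)
  decreasing_by exact Prod.Lex.right _ (Prod.Lex.left _ _ (by omega))

def dbForA (C : List String) (k : Int) (substrings : List String) (seqs : List String) (seq : String) (chars : List String) : List String :=
  match chars with
  | [] => seqs
  | ch :: rest =>
    if h : pvNewSub k seq ch ∈ substrings then
      dbForA C k substrings
        (PySem.Set.union seqs
          (de_bruijn_sequence C k (PySem.Set.diff substrings [pvNewSub k seq ch]) seqs (seq ++ ch)))
        seq rest
    else
      dbForA C k substrings seqs seq rest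
  termination_by (substrings.length, 0, chars.length)
  decreasing_by
    · exact Prod.Lex.left _ _ (pvDiff_length_lt h)
    · exact Prod.Lex.right _ (Prod.Lex.right _ (by simp only [List.length_cons]; omega))
    · exact Prod.Lex.right _ (Prod.Lex.right _ (by simp only [List.length_cons]; omega))
end

-- ===== PORT B =====
-- the inner `for char in C: … children.append(…)` loop of Source B
def dbChildren (C : List String) (k : Int) (rem : List String) (s : String) : List (List String × String) :=
  C.foldl (fun acc ch =>
    if pvNewSub k s ch ∈ rem then acc ++ [(PySem.Set.diff rem [pvNewSub k s ch], s ++ ch)] else acc) []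

-- the children list, written as filter+map (proved below PORT B only because the
-- termination argument of dbStack cites it)
theorem pvChildren_rep (C : List String) (k : Int) (rem : List String) (s : String) :
    dbChildren C k rem s =
      (C.filter (fun ch => decide (pvNewSub k s ch ∈ rem))).map
        (fun ch => (PySem.Set.diff rem [pvNewSub k s ch], s ++ ch)) := by
  unfold dbChildren
  suffices h : ∀ (l : List String) (acc : List (List String × String)),
      l.foldl (fun acc ch =>
        if pvNewSub k s ch ∈ rem then acc ++ [(PySem.Set.diff rem [pvNewSub k s ch], s ++ ch)] else acc) acc
      = acc ++ (l.filter (fun ch => decide (pvNewSub k s ch ∈ rem))).map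
          (fun ch => (PySem.Set.diff rem [pvNewSub k s ch], s ++ ch)) by
    simpa using h C []
  intro l
  induction l with
  | nil => intro acc; simp
  | cons a tl ih =>
    intro acc
    by_cases h : pvNewSub k s a ∈ rem
    · simp [h, ih]
    · simp [h, ih]

theorem pvChildren_measure (C : List String) (k : Int) (rem : List String) (s : String)
    (h : rem ≠ []) :
    ((dbChildren C k rem s).map (fun e => (C.length + 1) ^ e.1.length)).sum
      < (C.length + 1) ^ rem.length := by
  rw [pvChildren_rep, List.map_map]
  have hlen : ∀ l : List String, (∀ ch ∈ l, pvNewSub k s ch ∈ rem) →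
      (l.map ((fun e : List String × String => (C.length + 1) ^ e.1.length) ∘
        (fun ch => (PySem.Set.diff rem [pvNewSub k s ch], s ++ ch)))).sum
        ≤ l.length * (C.length + 1) ^ (rem.length - 1) := by
    intro l
    induction l with
    | nil => intro _; simp
    | cons a tl ih =>
      intro hmem
      have h1 : (PySem.Set.diff rem [pvNewSub k s a]).length ≤ rem.length - 1 := by
        have := pvDiff_length_lt (hmem a (List.mem_cons_self ..))
        omega
      have h2 : (C.length + 1) ^ (PySem.Set.diff rem [pvNewSub k s a]).length
          ≤ (C.length + 1) ^ (rem.length - 1) :=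
        Nat.pow_le_pow_right (by omega) h1
      have h3 := ih (fun ch hch => hmem ch (List.mem_cons_of_mem _ hch))
      simp only [List.map_cons, List.sum_cons, List.length_cons, Function.comp]
      calc (C.length + 1) ^ (PySem.Set.diff rem [pvNewSub k s a]).length +
            (tl.map _).sum
          ≤ (C.length + 1) ^ (rem.length - 1) + tl.length * (C.length + 1) ^ (rem.length - 1) :=
            Nat.add_le_add h2 h3
        _ = (tl.length + 1) * (C.length + 1) ^ (rem.length - 1) := by ring
  have hfl : (C.filter (fun ch => decide (pvNewSub k s ch ∈ rem))).length ≤ C.length :=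
    List.length_filter_le _ _
  have hall : ∀ ch ∈ C.filter (fun ch => decide (pvNewSub k s ch ∈ rem)),
      pvNewSub k s ch ∈ rem := by
    intro ch hch
    simpa using List.of_mem_filter hch
  have hsum := hlen _ hall
  have h0 : rem.length - 1 + 1 = rem.length := by
    cases rem with
    | nil => exact absurd rfl h
    | cons a tl => simp
  have hlt : (C.filter (fun ch => decide (pvNewSub k s ch ∈ rem))).length *
      (C.length + 1) ^ (rem.length - 1) < (C.length + 1) ^ rem.length := by
    calc (C.filter (fun ch => decide (pvNewSub k s ch ∈ rem))).length *
          (C.length + 1) ^ (rem.length - 1)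
        ≤ C.length * (C.length + 1) ^ (rem.length - 1) :=
          Nat.mul_le_mul_right _ hfl
      _ < (C.length + 1) * (C.length + 1) ^ (rem.length - 1) :=
          (Nat.mul_lt_mul_right (Nat.pow_pos (by omega))).mpr (by omega)
      _ = (C.length + 1) ^ rem.length := by rw [← pow_succ', h0]
  omega

-- the `while stack:` loop of Source B; the stack is a list with its TOP at the HEAD
-- (python appends/pops at the end; `stack.extend(reversed(children))` puts
-- children[0] on top, i.e. the new stack is `children ++ rest`).
def dbStack (C : List String) (k : Int) (stack : List (List String × String)) (seqs : List String) : List String :=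
  match stack with
  | [] => seqs
  | (rem, s) :: rest =>
    if h : rem = [] then dbStack C k rest (PySem.Set.add seqs s)
    else dbStack C k (dbChildren C k rem s ++ rest) seqs
termination_by (stack.map (fun e => (C.length + 1) ^ e.1.length)).sum
decreasing_by
  · simp only [List.map_cons, List.sum_cons]
    have h1 : 0 < (C.length + 1) ^ rem.length := Nat.pow_pos (by omega)
    omega
  · simp only [List.map_cons, List.sum_cons, List.map_append, List.sum_append]
    have h2 := pvChildren_measure C k rem s h
    omega

def de_bruijn_sequence_alt (C : List String) (k : Int) (substrings : List String) (seqs : List String) (seq : String) : List String :=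
  if substrings = [] then PySem.Set.ofList [seq]
  else dbStack C k [(substrings, seq)] seqs

-- ===== PRECONDITION & SPEC =====
def Spec_de_bruijn_sequence (C : List String) (k : Int) (substrings : List String) (seqs : List String) (seq : String) (out : List String) : Prop := out = de_bruijn_sequence_alt C k substrings seqs seq
instance (C : List String) (k : Int) (substrings : List String) (seqs : List String) (seq : String) (out : List String) : Decidable (Spec_de_bruijn_sequence C k substrings seqs seq out) := by unfold Spec_de_bruijn_sequence; infer_instance

-- ===== CLAIM (what is proved, stated in full; the proofs are below) =====
def Claim_equal_de_bruijn_sequence : Prop := ∀ (C : List String) (k : Int) (substrings : List String) (seqs : List String) (seq : String), Dom_de_bruijn_sequence C k substrings seqs seq → Spec_de_bruijn_sequence C k substrings seqs seq (de_bruijn_sequence C k substrings seqs seq)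

-- ===== LEMMAS AND PROOFS =====

-- what popping one stack entry contributes to the accumulated set
def dbPush1 (C : List String) (k : Int) (rem : List String) (s : String) (seqs : List String) : List String :=
  if rem = [] then PySem.Set.add seqs s else de_bruijn_sequence C k rem seqs s

-- `seqs.update(seqs) = seqs`
theorem pvUpdate_self (s : List String) : PySem.Set.update s s = s := by
  rw [PySem.Set.update_eq_append_filter]
  have h : (PySem.Set.ofList s).filter (fun y => !(PySem.Set.contains s y)) = [] := by
    apply List.filter_eq_nil_iff.mpr
    intro a ha
    have hmem : a ∈ s := (PySem.Set.mem_ofList s a).mp ha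
    simpa using hmem
  rw [h, List.append_nil]

-- unioning seqs with any update of seqs is absorbed
theorem pvUnion_update (seqs ys : List String) :
    PySem.Set.union seqs (PySem.Set.update seqs ys) = PySem.Set.update seqs ys := by
  conv_lhs => rw [PySem.Set.update_eq_append_filter seqs ys]
  unfold PySem.Set.union
  rw [PySem.Set.update_append, pvUpdate_self]
  rw [PySem.Set.update_eq_append_of_disjoint, ← PySem.Set.update_eq_append_filter]
  · exact List.Nodup.filter _ (PySem.Set.nodup_ofList ys)
  · intro x hx
    have hx' := List.of_mem_filter hx
    simp only [Bool.not_eq_true'] at hx'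
    intro hmem
    rw [(PySem.Set.contains_iff seqs x).mpr hmem] at hx'
    exact Bool.noConfusion hx'

-- every result of A's loop is an update of the incoming seqs
theorem pvForA_update (C : List String) (k : Int) (substrings : List String) (seq : String) :
    ∀ (chars seqs : List String), ∃ ys,
      dbForA C k substrings seqs seq chars = PySem.Set.update seqs ys := by
  intro chars
  induction chars with
  | nil => intro seqs; exact ⟨[], by rw [dbForA]; rfl⟩
  | cons ch rest ih =>
    intro seqs
    rw [dbForA]
    by_cases h : pvNewSub k seq ch ∈ substrings
    · simp only [dif_pos h]
      obtain ⟨ys, hys⟩ := ih (PySem.Set.union seqs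
        (de_bruijn_sequence C k (PySem.Set.diff substrings [pvNewSub k seq ch]) seqs (seq ++ ch)))
      refine ⟨(de_bruijn_sequence C k (PySem.Set.diff substrings [pvNewSub k seq ch]) seqs (seq ++ ch)) ++ ys, ?_⟩
      rw [hys, PySem.Set.update_append]
      rfl
    · simp only [dif_neg h]
      exact ih seqs

-- one pushed child, processed by A's recursion, equals A's union step
theorem pvStep_eq (C : List String) (k : Int) (substrings : List String) (seq : String)
    (seqs : List String) (ch : String) :
    PySem.Set.union seqs
        (de_bruijn_sequence C k (PySem.Set.diff substrings [pvNewSub k seq ch]) seqs (seq ++ ch))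
      = dbPush1 C k (PySem.Set.diff substrings [pvNewSub k seq ch]) (seq ++ ch) seqs := by
  unfold dbPush1
  by_cases hrem : PySem.Set.diff substrings [pvNewSub k seq ch] = []
  · rw [hrem, de_bruijn_sequence]
    rfl
  · rw [if_neg hrem, de_bruijn_sequence, if_neg hrem]
    obtain ⟨ys, hys⟩ := pvForA_update C k (PySem.Set.diff substrings [pvNewSub k seq ch]) (seq ++ ch) C seqs
    rw [hys]
    exact pvUnion_update seqs ys

-- processing a block of pushed entries one by one folds dbPush1 over them
theorem pvEntries (C : List String) (k : Int) (n : Nat)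
    (IH : ∀ rem, rem.length ≤ n → ∀ s rest seqs,
      dbStack C k ((rem, s) :: rest) seqs = dbStack C k rest (dbPush1 C k rem s seqs)) :
    ∀ (entries : List (List String × String)), (∀ e ∈ entries, e.1.length ≤ n) →
      ∀ rest seqs, dbStack C k (entries ++ rest) seqs
        = dbStack C k rest (entries.foldl (fun a e => dbPush1 C k e.1 e.2 a) seqs) := by
  intro entries
  induction entries with
  | nil => intro _ rest seqs; rfl
  | cons e tl ih =>
    intro hmem rest seqs
    obtain ⟨rem, s⟩ := e
    rw [List.cons_append, IH rem (hmem _ (List.mem_cons_self ..)) s (tl ++ rest) seqs]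
    rw [ih (fun e he => hmem e (List.mem_cons_of_mem _ he)) rest]
    rfl

-- folding dbPush1 over the children equals A's for-loop
theorem pvFold_eq_forA (C : List String) (k : Int) (substrings : List String) (seq : String) :
    ∀ (chars seqs : List String),
      ((chars.filter (fun ch => decide (pvNewSub k seq ch ∈ substrings))).map
          (fun ch => (PySem.Set.diff substrings [pvNewSub k seq ch], seq ++ ch))).foldl
        (fun a e => dbPush1 C k e.1 e.2 a) seqs
      = dbForA C k substrings seqs seq chars := by
  intro chars
  induction chars with
  | nil => intro seqs; rw [dbForA]; rfl
  | cons ch rest ih =>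
    intro seqs
    rw [dbForA]
    by_cases h : pvNewSub k seq ch ∈ substrings
    · rw [List.filter_cons_of_pos (by simpa using h)]
      simp only [List.map_cons, List.foldl_cons, dif_pos h]
      rw [← pvStep_eq C k substrings seq seqs ch]
      exact ih _
    · rw [List.filter_cons_of_neg (by simpa using h)]
      simp only [dif_neg h]
      exact ih seqs

-- the main invariant: popping one entry contributes exactly dbPush1
theorem pvMain (C : List String) (k : Int) :
    ∀ (n : Nat) (rem : List String), rem.length ≤ n → ∀ (s : String)
      (rest : List (List String × String)) (seqs : List String),
      dbStack C k ((rem, s) :: rest) seqs = dbStack C k rest (dbPush1 C k rem s seqs) := by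
  intro n
  induction n with
  | zero =>
    intro rem hlen s rest seqs
    have h : rem = [] := List.length_eq_zero_iff.mp (Nat.le_zero.mp hlen)
    subst h
    rw [dbStack]
    unfold dbPush1
    simp
  | succ n ih =>
    intro rem hlen s rest seqs
    by_cases hrem : rem = []
    · subst hrem
      rw [dbStack]
      unfold dbPush1
      simp
    · rw [dbStack, dif_neg hrem]
      have hsmall : ∀ e ∈ dbChildren C k rem s, e.1.length ≤ n := by
        intro e he
        rw [pvChildren_rep] at he
        obtain ⟨ch, hch, rfl⟩ := List.mem_map.mp he
        have hmem : pvNewSub k s ch ∈ rem := by simpa using List.of_mem_filter hch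
        have := pvDiff_length_lt hmem
        simp only at *
        omega
      rw [pvEntries C k n ih (dbChildren C k rem s) hsmall rest seqs]
      rw [pvChildren_rep, pvFold_eq_forA C k rem s C seqs]
      unfold dbPush1
      rw [if_neg hrem, de_bruijn_sequence, if_neg hrem]

-- ===== VERDICT (by name: the statement is the Claim_ definition above) =====
theorem de_bruijn_sequence_spec : Claim_equal_de_bruijn_sequence := by
  intro C k substrings seqs seq _
  unfold Spec_de_bruijn_sequence de_bruijn_sequence_alt
  by_cases h : substrings = []
  · subst h
    rw [de_bruijn_sequence]
    simp
  · rw [if_neg h]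
    rw [pvMain C k substrings.length substrings (le_refl _) seq [] seqs]
    rw [dbStack]
    unfold dbPush1
    rw [if_neg h, de_bruijn_sequence, if_neg h]
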